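-- pv_equiv track=rewrite | github.com/jameswmccarty/DailyProgrammer | chal_374.py | find_unis
-- ===== SOURCE A (Python) =====
-- def find_unis(ruleset):
-- 	flt = []
-- 	for i in range(len(ruleset[0])):
-- 		flt.append((i,set()))
-- 	for rule in ruleset:
-- 		for i in range(len(flt)):
-- 			flt[i][1].add(rule[i])
-- 	flt = [ (x[0], tuple(x[1])) for x in flt if len(x[1]) == 1 ]
-- 	return flt
-- ===== SOURCE B (Python) =====
-- def find_unis(ruleset):
--     first = ruleset[0]
--     uniform = []
--     for i, v in enumerate(first):
--         if all(rule[i] == v for rule in ruleset):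
--             uniform.append((i, (v,)))
--     return uniform
-- ===== Notes on version B (the rewrite author's own statement) =====
-- stated objective: alternative
-- what changed: B never builds sets: it takes the first row as reference and keeps a column iff every cell equals that reference value via a short-circuiting all(), instead of A's staged passes that pre-allocate a distinct-value set per column, stream every row into them, and then count set sizes.
import Mathlib
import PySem

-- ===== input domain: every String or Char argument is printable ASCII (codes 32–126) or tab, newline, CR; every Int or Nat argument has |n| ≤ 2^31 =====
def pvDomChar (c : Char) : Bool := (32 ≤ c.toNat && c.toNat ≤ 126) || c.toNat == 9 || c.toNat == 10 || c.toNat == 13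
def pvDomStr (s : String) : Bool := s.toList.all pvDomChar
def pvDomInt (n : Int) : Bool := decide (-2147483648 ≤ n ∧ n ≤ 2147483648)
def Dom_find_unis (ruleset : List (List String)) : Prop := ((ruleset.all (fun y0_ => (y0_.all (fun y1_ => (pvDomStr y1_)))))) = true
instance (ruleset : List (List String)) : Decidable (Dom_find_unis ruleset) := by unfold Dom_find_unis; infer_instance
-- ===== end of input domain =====

-- B drops A's per-column distinct-value sets entirely: a column is kept iff every cell equals
-- the first row's cell (objective: alternative); return values agree on Pre_.

-- ===== PORT A =====
-- A: flt = [(i, set()) for i in range(len(ruleset[0]))]; then each rule's cells are added into the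
-- sets in place (flt[i] always carries index i, so the in-place update is the map below);
-- finally the singleton sets are kept, tuple(set) of a singleton set being its one element.
def find_unis (ruleset : List (List String)) : List (Int × List String) :=
  -- len(ruleset[0]) : exact under Pre_ (ruleset ≠ [])
  let flt : List (Int × PySem.Set String) :=
    (PySem.List.pyRange 0 ((ruleset.headD []).length : Int)).map (fun i => (i, PySem.Set.empty))
  let flt := ruleset.foldl (fun flt rule =>
      flt.map (fun p => (p.1, PySem.Set.add p.2 (PySem.List.pyGetD rule p.1 "")))) flt
  (flt.filter (fun p => PySem.Set.len p.2 == 1)).map (fun p => (p.1, p.2))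

-- ===== PORT B =====
-- first = ruleset[0] : exact under Pre_ (ruleset ≠ []); rule[i] : exact under Pre_ (every rule at
-- least as long as the first).
def find_unis_alt (ruleset : List (List String)) : List (Int × List String) :=
  let first := ruleset.headD []
  (PySem.List.enumerate first 0).foldl (fun uniform iv =>
    if ruleset.all (fun rule => PySem.List.pyGetD rule iv.1 "" == iv.2)
    then uniform ++ [(iv.1, [iv.2])] else uniform) []

-- ===== PRECONDITION & SPEC =====
-- A raises IndexError on an empty ruleset (ruleset[0]) and whenever a rule is shorter than the
-- first rule (rule[i]); exactly those inputs are excluded.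
def Pre_find_unis (ruleset : List (List String)) : Prop :=
  ruleset ≠ [] ∧ ∀ r ∈ ruleset, (ruleset.headD []).length ≤ r.length
instance (ruleset : List (List String)) : Decidable (Pre_find_unis ruleset) := by
  unfold Pre_find_unis; infer_instance

def pvWitness_find_unis : List (List String) := [["a", "b"], ["a", "c"]]

def Spec_find_unis (ruleset : List (List String)) (out : List (Int × List String)) : Prop :=
  out = find_unis_alt ruleset
instance (ruleset : List (List String)) (out : List (Int × List String)) :
    Decidable (Spec_find_unis ruleset out) := by unfold Spec_find_unis; infer_instance

-- ===== CLAIM (what is proved, stated in full; the proofs are below) =====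
def Claim_equal_find_unis : Prop := ∀ (ruleset : List (List String)),
  Dom_find_unis ruleset → Pre_find_unis ruleset → Spec_find_unis ruleset (find_unis ruleset)

-- ===== LEMMAS AND PROOFS =====

-- A's double loop: adding every rule's cells into per-column sets, column by column.
theorem foldA_map (rs : List (List String)) (L : List Int) (s : Int → PySem.Set String) :
    rs.foldl (fun flt rule =>
        flt.map (fun p => (p.1, PySem.Set.add p.2 (PySem.List.pyGetD rule p.1 "")))) (L.map (fun i => (i, s i)))
      = L.map (fun i => (i, (rs.map (fun r => PySem.List.pyGetD r i "")).foldl PySem.Set.add (s i))) := by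
  induction rs generalizing s with
  | nil => simp
  | cons r rs ih =>
      simp only [List.foldl_cons, List.map_map, List.map_cons]
      have := ih (fun i => PySem.Set.add (s i) (PySem.List.pyGetD r i ""))
      simpa [Function.comp] using this

-- a Set grows only at the right
theorem foldl_add_prefix (xs : List String) (s : PySem.Set String) :
    s <+: xs.foldl PySem.Set.add s := by
  induction xs generalizing s with
  | nil => simp
  | cons x xs ih =>
      refine List.IsPrefix.trans ?_ (ih (PySem.Set.add s x))
      simp only [PySem.Set.add]
      split
      · simp
      · simp

theorem ofList_singleton_of_len_one (c : String) (cs : List String)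
    (h : (PySem.Set.ofList (c :: cs)).length = 1) : PySem.Set.ofList (c :: cs) = [c] := by
  have hse : PySem.Set.ofList (c :: cs) = cs.foldl PySem.Set.add [c] := by
    simp [PySem.Set.ofList, PySem.Set.empty, PySem.Set.add]
  have hpre : [c] <+: PySem.Set.ofList (c :: cs) := hse ▸ foldl_add_prefix cs [c]
  exact (List.IsPrefix.eq_of_length hpre (by simpa using h.symm)).symm

theorem foldl_add_all_eq (c : String) (cs : List String)
    (h : ∀ x ∈ cs, x = c) : cs.foldl PySem.Set.add [c] = [c] := by
  induction cs with
  | nil => rfl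
  | cons x xs ih =>
      have hx : x = c := h x (by simp)
      simp only [List.foldl_cons, hx, PySem.Set.add]
      rw [if_pos (by simp [PySem.Set.contains])]
      exact ih (fun y hy => h y (by simp [hy]))

-- the core equivalence of the two characterisations of a uniform column
theorem set_len_one_iff (c : String) (cs : List String) :
    (PySem.Set.ofList (c :: cs)).length = 1 ↔ ∀ x ∈ cs, x = c := by
  constructor
  · intro h x hx
    have hs := ofList_singleton_of_len_one c cs h
    have hmem : x ∈ PySem.Set.ofList (c :: cs) := by
      rw [PySem.Set.mem_ofList]; exact List.mem_cons_of_mem c hx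
    rw [hs] at hmem; simpa using hmem
  · intro h
    have hse : PySem.Set.ofList (c :: cs) = cs.foldl PySem.Set.add [c] := by
      simp [PySem.Set.ofList, PySem.Set.empty, PySem.Set.add]
    rw [hse, foldl_add_all_eq c cs h]; rfl

theorem enum_range_map {α : Type} (n : Nat) (s : Int) (g : Nat → α) :
    PySem.List.enumerate ((List.range n).map g) s
      = (List.range n).map (fun (k : Nat) => (s + (k : Int), g k)) := by
  induction n generalizing s g with
  | zero => simp
  | succ n ih =>
      simp only [List.range_succ_eq_map, List.map_cons, List.map_map,
        PySem.List.enumerate_cons]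
      rw [ih (s + 1) (g ∘ Nat.succ)]
      refine congrArg₂ List.cons (by simp) ?_
      apply List.map_congr_left
      intro k _
      simp only [Function.comp, Nat.succ_eq_add_one]
      refine Prod.ext ?_ rfl
      push_cast; ring

theorem range_map_getD (r0 : List String) :
    r0 = (List.range r0.length).map (fun k => r0.getD k "") := by
  apply List.ext_getElem
  · simp
  · intro i h1 h2
    simp [List.getD, List.getElem?_eq_getElem h1]

-- ===== VERDICT (by name: the statement is the Claim_ definition above) =====
theorem find_unis_spec : Claim_equal_find_unis := by
  intro rs _ hpre
  obtain ⟨hne, hlen⟩ := hpre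
  obtain ⟨r0, rest, rfl⟩ := List.exists_cons_of_ne_nil hne
  show find_unis (r0 :: rest) = find_unis_alt (r0 :: rest)
  set n := r0.length with hn
  -- A side
  have hA : find_unis (r0 :: rest)
      = ((List.range n).filter
            (fun (k : Nat) => PySem.Set.len (PySem.Set.ofList ((r0 :: rest).map (fun r => r.getD k ""))) == 1)).map
          (fun (k : Nat) => ((k : Int), PySem.Set.ofList ((r0 :: rest).map (fun r => r.getD k "")))) := by
    unfold find_unis
    simp only [List.headD_cons, PySem.List.pyRange_zero_nat, List.map_map]
    rw [← List.map_map, foldA_map]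
    simp [Function.comp_def, PySem.Set.ofList, PySem.Set.empty, List.filter_map, hn]
  -- B side
  have henum : PySem.List.enumerate r0 0
      = (List.range n).map (fun (k : Nat) => ((k : Int), r0.getD k "")) := by
    conv_lhs => rw [range_map_getD r0]
    rw [enum_range_map r0.length 0 (fun k => r0.getD k "")]
    simp [hn]
  have hB : find_unis_alt (r0 :: rest)
      = ((List.range n).filter
            (fun (k : Nat) => (r0 :: rest).all (fun r => r.getD k "" == r0.getD k ""))).map
          (fun (k : Nat) => ((k : Int), [r0.getD k ""])) := by
    unfold find_unis_alt
    simp only [List.headD_cons]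
    rw [PySem.List.foldl_append_if
      (fun iv : Int × String => (r0 :: rest).all (fun rule => PySem.List.pyGetD rule iv.1 "" == iv.2))
      (fun iv : Int × String => (iv.1, [iv.2]))]
    rw [henum]
    simp only [List.nil_append, List.filter_map, List.map_map]
    congr 1
    · apply List.filter_congr
      intro k _
      simp [Function.comp]
  rw [hA, hB]
  have hpred : ∀ k : Nat,
      (PySem.Set.len (PySem.Set.ofList ((r0 :: rest).map (fun r => r.getD k ""))) == 1)
        = (r0 :: rest).all (fun r => r.getD k "" == r0.getD k "") := by
    intro k
    rw [Bool.eq_iff_iff]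
    simp only [List.all_cons, beq_self_eq_true, Bool.true_and, List.all_eq_true, beq_iff_eq,
      List.map_cons, PySem.Set.len, beq_iff_eq]
    rw [show ((PySem.Set.ofList (r0.getD k "" :: rest.map (fun r => r.getD k ""))).length : Int) = 1
        ↔ (PySem.Set.ofList (r0.getD k "" :: rest.map (fun r => r.getD k ""))).length = 1 from by
      exact_mod_cast Iff.rfl]
    rw [set_len_one_iff]
    constructor
    · intro h r hr
      exact h _ (List.mem_map_of_mem hr)
    · intro h x hx
      obtain ⟨r, hr, rfl⟩ := List.mem_map.mp hx
      exact h r hr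
  rw [List.filter_congr (fun k _ => hpred k)]
  apply List.map_congr_left
  intro k hk
  have h1 := (List.mem_filter.mp hk).2
  rw [← hpred k] at h1
  have hlen1 : (PySem.Set.ofList ((r0 :: rest).map (fun r => r.getD k ""))).length = 1 := by
    have : PySem.Set.len (PySem.Set.ofList ((r0 :: rest).map (fun r => r.getD k ""))) = 1 := by
      simpa using h1
    simpa [PySem.Set.len] using this
  have hsing := ofList_singleton_of_len_one (r0.getD k "") (rest.map (fun r => r.getD k ""))
    (by simpa using hlen1)
  simp only [List.map_cons] at *
  rw [hsing]
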